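-- pv_equiv track=rewrite | github.com/lydia-gao/LeetCode | 1576-reorder-routes-to-make-all-paths-lead-to-the-city-zero/1576-reorder-routes-to-make-all-paths-lead-to-the-city-zero.py | minReorder
-- ===== SOURCE A (Python) =====
-- from typing import List
--
-- from collections import defaultdict
--
-- def minReorder(n: int, connections: List[List[int]]) -> int:
--     graph = defaultdict(list)
--
--     # Build graph with direction flag
--     for a, b in connections:
--         graph[a].append((b, 1))  # edge a → b (needs reversal if used)
--         graph[b].append((a, 0))  # edge b → a (already correct)
--
--     visited = [False] * n
--
--     def dfs(city):
--         visited[city] = True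
--         changes = 0
--         for nei, sign in graph[city]:
--             if not visited[nei]:
--                 changes += sign      # count 1 if edge is pointing away from 0
--                 changes += dfs(nei)
--         return changes
--
--     return dfs(0)
-- ===== SOURCE B (Python) =====
-- from typing import List
--
-- from collections import defaultdict
--
-- def minReorder(n: int, connections: List[List[int]]) -> int:
--     graph = defaultdict(list)
--
--     # Build graph with direction flag (same construction as A)
--     for a, b in connections:
--         graph[a].append((b, 1))
--         graph[b].append((a, 0))
--
--     visited = [False] * n
--     total = 0
--     stack = [(0, 0)]  # (city, sign of the edge it was discovered through)
--     while stack: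
--         city, sign = stack.pop()
--         if visited[city]:
--             continue
--         visited[city] = True
--         total += sign
--         for nei, s in reversed(graph[city]):
--             if not visited[nei]:
--                 stack.append((nei, s))
--     return total
-- ===== Notes on version B (the rewrite author's own statement) =====
-- stated objective: alternative
-- what changed: Replaces A's recursive dfs closure over mutable state with an explicit iterative worklist: a stack of (city, edge-sign) pairs popped in a loop, visited checked at pop time, and a node's neighbours pushed in reverse order, which provably reproduces the recursive DFS discovery order. Pre_ admits inputs with all endpoints in [-n, n) and inputs that never mention city 0; …
-- outside the precondition, e.g. on minReorder(2, [[0, 1], [5, 5]]): A returns 1, B returns 1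
import Mathlib
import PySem

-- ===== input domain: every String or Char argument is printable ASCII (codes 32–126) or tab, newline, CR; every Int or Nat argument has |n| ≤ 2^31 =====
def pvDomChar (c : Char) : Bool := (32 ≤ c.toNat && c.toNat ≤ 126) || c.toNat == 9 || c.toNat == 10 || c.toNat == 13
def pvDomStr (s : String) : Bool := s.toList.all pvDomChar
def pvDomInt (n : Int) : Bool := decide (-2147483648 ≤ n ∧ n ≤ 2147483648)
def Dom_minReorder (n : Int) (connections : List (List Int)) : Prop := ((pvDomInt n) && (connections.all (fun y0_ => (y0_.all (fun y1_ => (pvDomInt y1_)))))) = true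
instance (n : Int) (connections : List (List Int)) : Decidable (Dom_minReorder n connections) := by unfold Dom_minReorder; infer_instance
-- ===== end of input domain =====

-- B replaces A's recursive dfs with an explicit iterative stack worklist (visited checked at pop,
-- neighbours pushed in reverse); same graph construction, same return value on Pre_.


-- ===== PORT A =====
-- graph = defaultdict(list); for a, b in connections: graph[a].append((b,1)); graph[b].append((a,0))
-- (identical lines in A and B, so the helper is shared by both ports)
def stepG (d : PySem.Dict Int (List (Int × Int))) (row : List Int) : PySem.Dict Int (List (Int × Int)) :=
  match row with
  | [a, b] => (d.modify a [] (· ++ [(b, 1)])).modify b [] (· ++ [(a, 0)])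
  | _ => d   -- any other row shape raises ValueError in Python (outside Pre_)

def buildGraph (connections : List (List Int)) : PySem.Dict Int (List (Int × Int)) :=
  connections.foldl stepG PySem.Dict.empty

-- the 'for nei, sign in graph[city]' scan of A's dfs; F is the recursive call
def visitA (F : Int → List Bool → Int × List Bool) :
    List (Int × Int) → Int → List Bool → Int × List Bool
  | [], changes, vis => (changes, vis)
  | (nei, sign) :: rest, changes, vis =>
    match PySem.List.pyGet? vis nei with
    | some true => visitA F rest changes vis
    | some false =>
        let r := F nei vis
        visitA F rest (changes + sign + r.1) r.2
    | none => (changes, vis)   -- IndexError (outside Pre_)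

-- A's recursive dfs; the fuel n+1 is a totality guard only, never exhausted under Pre_
def dfsA (g : PySem.Dict Int (List (Int × Int))) :
    Nat → Int → List Bool → Int × List Bool
  | 0, _, vis => (0, vis)
  | fuel + 1, city, vis =>
      visitA (dfsA g fuel) (g.getD city []) 0 (PySem.List.pySetD vis city true)

def minReorder (n : Int) (connections : List (List Int)) : Int :=
  let graph := buildGraph connections
  (dfsA graph (n.toNat + 1) 0 (List.replicate n.toNat false)).1

-- ===== PORT B =====
-- 'for nei, s in reversed(graph[city]): if not visited[nei]: stack.append((nei, s))'
def pushB (vis : List Bool) : List (Int × Int) → List (Int × Int) → List (Int × Int)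
  | [], stack => stack
  | (nei, s) :: rest, stack =>
      pushB vis rest (if PySem.List.pyGet? vis nei = some false then (nei, s) :: stack else stack)

-- termination helper for the while-loop: marking an unvisited city lowers the unvisited count
theorem countFalse_pySetD_lt (l : List Bool) (i : Int)
    (h : PySem.List.pyGet? l i = some false) :
    (PySem.List.pySetD l i true).count false < l.count false := by
  unfold PySem.List.pyGet? at h
  cases hk : PySem.List.pyIdx? l.length i with
  | none => rw [hk] at h; simp at h
  | some k =>
    rw [hk] at h
    simp at h
    have hset : PySem.List.pySetD l i true = l.set k true := by
      simp [PySem.List.pySetD, PySem.List.pySet?, hk]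
    rw [hset]
    clear hk hset
    induction l generalizing k with
    | nil => simp at h
    | cons x xs ih =>
      cases k with
      | zero =>
        simp at h
        subst h
        simp
      | succ k =>
        simp at h
        have := ih k h
        simp [List.count_cons]
        omega

-- the while-stack loop of B (head of the list = top of the Python stack)
def loopB (g : PySem.Dict Int (List (Int × Int))) :
    List (Int × Int) → Int → List Bool → Int
  | [], total, _ => total
  | (city, sign) :: stack, total, vis =>
    match h : PySem.List.pyGet? vis city with
    | some true => loopB g stack total vis
    | some false =>
        loopB g (pushB (PySem.List.pySetD vis city true) (g.getD city []).reverse stack)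
          (total + sign) (PySem.List.pySetD vis city true)
    | none => total   -- IndexError (outside Pre_)
  termination_by stack _ vis => (vis.count false, stack.length)
  decreasing_by
  · exact Prod.Lex.right _ (Nat.lt_succ_self _)
  · exact Prod.Lex.left _ _ (countFalse_pySetD_lt vis city h)

def minReorder_alt (n : Int) (connections : List (List Int)) : Int :=
  let graph := buildGraph connections
  loopB graph [(0, 0)] 0 (List.replicate n.toNat false)

-- ===== PRECONDITION & SPEC =====
-- Pre_ admits inputs whose endpoints all lie in [-n, n), and also inputs that never mention
-- city 0 (the traversal then stops immediately); inputs with an out-of-range endpoint that do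
-- mention city 0 are excluded, because A raises IndexError exactly when the DFS from city 0
-- reaches the out-of-range city, and reachability is not a closed-form input condition, so A
-- may still return on the unreachable ones (rows that are not two-element lists raise ValueError).
def Pre_minReorder (n : Int) (connections : List (List Int)) : Prop :=
  1 ≤ n ∧ (∀ c ∈ connections, c.length = 2) ∧
    ((∀ c ∈ connections, ∀ e ∈ c, -n ≤ e ∧ e < n) ∨ (∀ c ∈ connections, ∀ e ∈ c, e ≠ 0))

instance (n : Int) (connections : List (List Int)) : Decidable (Pre_minReorder n connections) := by
  unfold Pre_minReorder; infer_instance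

def pvWitness_minReorder : Int × List (List Int) := (3, [[0, 1], [1, 2]])

def Spec_minReorder (n : Int) (connections : List (List Int)) (out : Int) : Prop := out = minReorder_alt n connections
instance (n : Int) (connections : List (List Int)) (out : Int) : Decidable (Spec_minReorder n connections out) := by unfold Spec_minReorder; infer_instance

-- ===== CLAIM (what is proved, stated in full; the proofs are below) =====
def Claim_equal_minReorder : Prop := ∀ (n : Int) (connections : List (List Int)), Dom_minReorder n connections → Pre_minReorder n connections → Spec_minReorder n connections (minReorder n connections)

-- ===== LEMMAS AND PROOFS =====

theorem pyGet?_some_elim {α : Type} {l : List α} {i : Int} {b : α}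
    (h : PySem.List.pyGet? l i = some b) :
    ∃ k, PySem.List.pyIdx? l.length i = some k ∧ l[k]? = some b := by
  unfold PySem.List.pyGet? at h
  cases hk : PySem.List.pyIdx? l.length i with
  | none => rw [hk] at h; simp at h
  | some k => rw [hk] at h; simp at h; exact ⟨k, rfl, h⟩

theorem pySetD_eq_set {α : Type} {l : List α} {i : Int} {k : Nat} (v : α)
    (hk : PySem.List.pyIdx? l.length i = some k) :
    PySem.List.pySetD l i v = l.set k v := by
  simp [PySem.List.pySetD, PySem.List.pySet?, hk]

theorem count_false_set_true_le (l : List Bool) (k : Nat) :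
    (l.set k true).count false ≤ l.count false := by
  induction l generalizing k with
  | nil => simp
  | cons x xs ih =>
    cases k with
    | zero => simp [List.count_cons]
    | succ k => simp [List.count_cons]; have := ih k; omega

def Ple (v v' : List Bool) : Prop :=
  v'.length = v.length ∧ v'.count false ≤ v.count false ∧
    ∀ j, PySem.List.pyGet? v j = some true → PySem.List.pyGet? v' j = some true

theorem Ple_refl (v : List Bool) : Ple v v := ⟨rfl, le_refl _, fun _ h => h⟩

theorem Ple_trans {u v w : List Bool} (h1 : Ple u v) (h2 : Ple v w) : Ple u w :=
  ⟨h2.1.trans h1.1, h2.2.1.trans h1.2.1, fun j hj => h2.2.2 j (h1.2.2 j hj)⟩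

theorem Ple_set (v : List Bool) (i : Int) : Ple v (PySem.List.pySetD v i true) := by
  cases hk : PySem.List.pyIdx? v.length i with
  | none =>
    have : PySem.List.pySetD v i true = v := by
      simp [PySem.List.pySetD, PySem.List.pySet?, hk]
    rw [this]; exact ⟨rfl, le_refl _, fun _ h => h⟩
  | some k =>
    rw [pySetD_eq_set true hk]
    refine ⟨List.length_set .., count_false_set_true_le v k, ?_⟩
    intro j hj
    obtain ⟨m, hm, hget⟩ := pyGet?_some_elim hj
    have hmlt : m < v.length := by
      have := List.getElem?_eq_some_iff.1 hget; exact this.1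
    unfold PySem.List.pyGet?
    rw [List.length_set, hm]
    simp only [Option.bind]
    rw [List.getElem?_set]
    split
    · split
      · rfl
      · omega
    · exact hget

theorem count_false_pos_of_pyGet?_false {l : List Bool} {i : Int}
    (h : PySem.List.pyGet? l i = some false) : 0 < l.count false := by
  obtain ⟨k, hk, hget⟩ := pyGet?_some_elim h
  have : false ∈ l := List.mem_of_getElem? hget
  exact List.count_pos_iff.2 this

theorem pyGet?_ne_none_of_inRange {α : Type} {l : List α} {i : Int} {N : Nat}
    (hlen : l.length = N) (hr : PySem.Raise.InRange N i) :
    PySem.List.pyGet? l i ≠ none := by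
  intro hc
  rw [PySem.List.pyGet?_eq_none_iff, hlen] at hc
  exact hc hr

theorem visitA_Ple (F : Int → List Bool → Int × List Bool)
    (hF : ∀ c v, Ple v (F c v).2) :
    ∀ (l : List (Int × Int)) (a : Int) (vis : List Bool), Ple vis (visitA F l a vis).2 := by
  intro l
  induction l with
  | nil => intro a vis; exact Ple_refl _
  | cons e rest ih =>
    intro a vis
    obtain ⟨nei, s⟩ := e
    cases hv : PySem.List.pyGet? vis nei with
    | none => simp [visitA, hv]; exact Ple_refl _
    | some b =>
      cases b with
      | true => simp [visitA, hv]; exact ih _ _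
      | false => simp [visitA, hv]; exact Ple_trans (hF nei vis) (ih _ _)

theorem dfsA_Ple (g : PySem.Dict Int (List (Int × Int))) :
    ∀ (fuel : Nat) (c : Int) (v : List Bool), Ple v (dfsA g fuel c v).2 := by
  intro fuel
  induction fuel with
  | zero => intro c v; exact Ple_refl _
  | succ f ih =>
    intro c v
    simp only [dfsA]
    exact Ple_trans (Ple_set v c) (visitA_Ple _ ih _ _ _)

theorem visitA_acc (F : Int → List Bool → Int × List Bool) :
    ∀ (l : List (Int × Int)) (a : Int) (vis : List Bool),
      visitA F l a vis = (a + (visitA F l 0 vis).1, (visitA F l 0 vis).2) := by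
  intro l
  induction l with
  | nil => intro a vis; simp [visitA]
  | cons e rest ih =>
    intro a vis
    obtain ⟨nei, s⟩ := e
    cases hv : PySem.List.pyGet? vis nei with
    | none => simp [visitA, hv]
    | some b =>
      cases b with
      | true => simp only [visitA, hv]; exact ih _ _
      | false =>
        simp only [visitA, hv]
        rw [ih (a + s + (F nei vis).1), ih (0 + s + (F nei vis).1)]
        simp only [Prod.mk.injEq]
        ring_nf
        exact ⟨trivial, trivial⟩

theorem pushB_spec (vis : List Bool) :
    ∀ (m stack : List (Int × Int)),
      pushB vis m stack
        = (m.filter (fun e => PySem.List.pyGet? vis e.1 == some false)).reverse ++ stack := by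
  intro m
  induction m with
  | nil => intro stack; simp [pushB]
  | cons e rest ih =>
    intro stack
    obtain ⟨nei, s⟩ := e
    by_cases h : PySem.List.pyGet? vis nei = some false
    · simp [pushB, h, ih]
    · simp [pushB, h, ih]

theorem pushB_reverse (vis : List Bool) (l stack : List (Int × Int)) :
    pushB vis l.reverse stack
      = (l.filter (fun e => PySem.List.pyGet? vis e.1 == some false)) ++ stack := by
  rw [pushB_spec, List.filter_reverse, List.reverse_reverse]

theorem visitA_filter (F : Int → List Bool → Int × List Bool)
    (hF : ∀ c v, Ple v (F c v).2) (vis0 : List Bool) :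
    ∀ (l : List (Int × Int)) (a : Int) (vis : List Bool),
      (∀ e ∈ l, PySem.List.pyGet? vis0 e.1 ≠ none) →
      (∀ j, PySem.List.pyGet? vis0 j = some true → PySem.List.pyGet? vis j = some true) →
      visitA F (l.filter (fun e => PySem.List.pyGet? vis0 e.1 == some false)) a vis
        = visitA F l a vis := by
  intro l
  induction l with
  | nil => intro a vis _ _; simp
  | cons e rest ih =>
    intro a vis hnn hle
    obtain ⟨nei, s⟩ := e
    by_cases hp : PySem.List.pyGet? vis0 nei = some false
    · rw [List.filter_cons_of_pos (by simpa using hp)]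
      cases hv : PySem.List.pyGet? vis nei with
      | none => simp [visitA, hv]
      | some b =>
        cases b with
        | true =>
          simp only [visitA, hv]
          exact ih _ _ (fun e he => hnn e (List.mem_cons_of_mem _ he)) hle
        | false =>
          simp only [visitA, hv]
          exact ih _ _ (fun e he => hnn e (List.mem_cons_of_mem _ he))
            (fun j hj => (hF nei vis).2.2 j (hle j hj))
    · have hnt : PySem.List.pyGet? vis0 nei = some true := by
        cases h' : PySem.List.pyGet? vis0 nei with
        | none => exact absurd h' (hnn (nei, s) (List.mem_cons_self))
        | some b => cases b with
          | true => rfl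
          | false => exact absurd h' hp
      have hv : PySem.List.pyGet? vis nei = some true := hle nei hnt
      rw [List.filter_cons_of_neg (by simpa using hp)]
      conv_rhs => rw [show visitA F ((nei, s) :: rest) a vis = visitA F rest a vis from by
        simp [visitA, hv]]
      exact ih _ _ (fun e he => hnn e (List.mem_cons_of_mem _ he)) hle

theorem scan (g : PySem.Dict Int (List (Int × Int))) (N : Nat)
    (hg : ∀ c, ∀ e ∈ g.getD c [], PySem.Raise.InRange N e.1) :
    ∀ (fa : Nat) (l stack : List (Int × Int)) (total : Int) (vis : List Bool),
      vis.length = N → (∀ e ∈ l, PySem.Raise.InRange N e.1) → vis.count false ≤ fa →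
      loopB g (l ++ stack) total vis
        = loopB g stack (total + (visitA (dfsA g fa) l 0 vis).1)
            ((visitA (dfsA g fa) l 0 vis).2) := by
  intro fa
  induction fa with
  | zero =>
    intro l stack
    induction l generalizing stack with
    | nil => intro total vis _ _ _; simp [visitA]
    | cons e rest ih =>
      intro total vis hlen hl hcf
      obtain ⟨nei, s⟩ := e
      have hr := hl (nei, s) List.mem_cons_self
      have hnn := pyGet?_ne_none_of_inRange hlen hr
      rw [List.cons_append, loopB]
      split
      · rename_i hv
        simp only [visitA, hv]
        exact ih stack total vis hlen (fun e he => hl e (List.mem_cons_of_mem _ he)) hcf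
      · rename_i hv
        have := count_false_pos_of_pyGet?_false hv
        omega
      · rename_i hv
        exact absurd hv hnn
  | succ fa' ihfa =>
    intro l stack
    induction l generalizing stack with
    | nil => intro total vis _ _ _; simp [visitA]
    | cons e rest ih =>
      intro total vis hlen hl hcf
      obtain ⟨nei, s⟩ := e
      have hr := hl (nei, s) List.mem_cons_self
      have hnn := pyGet?_ne_none_of_inRange hlen hr
      rw [List.cons_append, loopB]
      split
      · rename_i hv
        simp only [visitA, hv]
        exact ih stack total vis hlen (fun e he => hl e (List.mem_cons_of_mem _ he)) hcf
      · rename_i hv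
        rw [pushB_reverse]
        have hple := Ple_set vis nei
        have hlen1 : (PySem.List.pySetD vis nei true).length = N := hple.1.trans hlen
        have hcf1 : (PySem.List.pySetD vis nei true).count false ≤ fa' := by
          have := countFalse_pySetD_lt vis nei hv; omega
        rw [ihfa _ (rest ++ stack) (total + s) _ hlen1
          (fun e he => hg nei e (List.mem_of_mem_filter he)) hcf1]
        rw [visitA_filter (dfsA g fa') (dfsA_Ple g fa') _ _ _ _
          (fun e he hnone => pyGet?_ne_none_of_inRange hlen1 (hg nei e he) hnone)
          (fun _ h => h)]
        have hdfs : visitA (dfsA g fa') (g.getD nei []) 0 (PySem.List.pySetD vis nei true)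
            = dfsA g (fa' + 1) nei vis := by simp only [dfsA]
        rw [hdfs]
        have hple2 := dfsA_Ple g (fa' + 1) nei vis
        rw [ih (stack) _ _ (hple2.1.trans hlen)
          (fun e he => hl e (List.mem_cons_of_mem _ he)) (hple2.2.1.trans hcf)]
        simp only [visitA, hv]
        rw [visitA_acc (dfsA g (fa' + 1)) rest (0 + s + (dfsA g (fa' + 1) nei vis).1)]
        congr 1
        ring
      · rename_i hv
        exact absurd hv hnn

theorem stepG_adjOK (N : Nat) (d : PySem.Dict Int (List (Int × Int))) (row : List Int)
    (hrow : row.length = 2 ∧ ∀ e ∈ row, PySem.Raise.InRange N e)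
    (hd : ∀ c, ∀ e ∈ d.getD c [], PySem.Raise.InRange N e.1) :
    ∀ c, ∀ e ∈ (stepG d row).getD c [], PySem.Raise.InRange N e.1 := by
  obtain ⟨hlen, hmem⟩ := hrow
  match row, hlen with
  | [a, b], _ =>
    have ha : PySem.Raise.InRange N a := hmem a (by simp)
    have hb : PySem.Raise.InRange N b := hmem b (by simp)
    intro c e he
    simp only [stepG] at he
    rw [PySem.Dict.getD_modify] at he
    split at he
    · rcases List.mem_append.1 he with h1 | h1
      · rw [PySem.Dict.getD_modify] at h1
        split at h1
        · rcases List.mem_append.1 h1 with h2 | h2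
          · exact hd _ _ h2
          · rw [List.mem_singleton.1 h2]; exact hb
        · exact hd _ _ h1
      · rw [List.mem_singleton.1 h1]; exact ha
    · rw [PySem.Dict.getD_modify] at he
      split at he
      · rcases List.mem_append.1 he with h2 | h2
        · exact hd _ _ h2
        · rw [List.mem_singleton.1 h2]; exact hb
      · exact hd _ _ he

theorem buildGraph_adjOK (N : Nat) (connections : List (List Int))
    (hc : ∀ c ∈ connections, c.length = 2 ∧ ∀ e ∈ c, PySem.Raise.InRange N e) :
    ∀ c, ∀ e ∈ (buildGraph connections).getD c [], PySem.Raise.InRange N e.1 := by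
  unfold buildGraph
  suffices h : ∀ (conns : List (List Int)) (d : PySem.Dict Int (List (Int × Int))),
      (∀ c ∈ conns, c.length = 2 ∧ ∀ e ∈ c, PySem.Raise.InRange N e) →
      (∀ c, ∀ e ∈ d.getD c [], PySem.Raise.InRange N e.1) →
      ∀ c, ∀ e ∈ (conns.foldl stepG d).getD c [], PySem.Raise.InRange N e.1 by
    exact h connections PySem.Dict.empty hc (by simp [PySem.Dict.getD_empty])
  intro conns
  induction conns with
  | nil => intro d _ hd; exact hd
  | cons row rest ih =>
    intro d hrows hd
    exact ih (stepG d row) (fun c hcm => hrows c (List.mem_cons_of_mem _ hcm))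
      (stepG_adjOK N d row (hrows row List.mem_cons_self) hd)

theorem buildGraph_getD_zero (connections : List (List Int))
    (h : ∀ c ∈ connections, ∀ e ∈ c, e ≠ 0) :
    (buildGraph connections).getD 0 [] = [] := by
  unfold buildGraph
  suffices hgen : ∀ (conns : List (List Int)) (d : PySem.Dict Int (List (Int × Int))),
      (∀ c ∈ conns, ∀ e ∈ c, e ≠ 0) → d.getD 0 [] = [] →
      (conns.foldl stepG d).getD 0 [] = [] by
    exact hgen connections PySem.Dict.empty h (by simp [PySem.Dict.getD_empty])
  intro conns
  induction conns with
  | nil => intro d _ hd; exact hd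
  | cons row rest ih =>
    intro d hrows hd
    refine ih (stepG d row) (fun c hc => hrows c (List.mem_cons_of_mem _ hc)) ?_
    match row with
    | [a, b] =>
      have ha : a ≠ 0 := hrows [a, b] List.mem_cons_self a (by simp)
      have hb : b ≠ 0 := hrows [a, b] List.mem_cons_self b (by simp)
      simp only [stepG]
      rw [PySem.Dict.getD_modify, if_neg (fun hh => hb hh.symm),
        PySem.Dict.getD_modify, if_neg (fun hh => ha hh.symm)]
      exact hd
    | [] => exact hd
    | [_] => exact hd
    | _ :: _ :: _ :: _ => exact hd

theorem loopB_zero (g : PySem.Dict Int (List (Int × Int))) (N : Nat) (hN : 0 < N)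
    (hg0 : g.getD 0 [] = []) :
    loopB g [(0, 0)] 0 (List.replicate N false) = 0 := by
  have hv0 : PySem.List.pyGet? (List.replicate N false) (0 : Int) = some false := by
    unfold PySem.List.pyGet? PySem.List.pyIdx?
    simp [hN]
  rw [loopB]
  split
  · rename_i h; rw [hv0] at h; simp at h
  · rw [hg0]
    show loopB g (pushB _ [] []) (0 + 0) _ = 0
    rw [show pushB (PySem.List.pySetD (List.replicate N false) 0 true) [] [] = [] from rfl,
      loopB]
    norm_num
  · rename_i h; rw [hv0] at h

theorem minReorder_eq (n : Int) (connections : List (List Int))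
    (hpre : Pre_minReorder n connections) :
    minReorder n connections = minReorder_alt n connections := by
  obtain ⟨hn, hlen, hdisj⟩ := hpre
  rcases hdisj with hin | h0
  case inr =>
    have hg0 := buildGraph_getD_zero connections h0
    simp only [minReorder, minReorder_alt]
    rw [loopB_zero _ n.toNat (by omega) hg0]
    show (dfsA (buildGraph connections) (n.toNat + 1) 0 (List.replicate n.toNat false)).1 = 0
    simp [dfsA, hg0, visitA]
  have hrows : ∀ c ∈ connections, c.length = 2 ∧ ∀ e ∈ c, -n ≤ e ∧ e < n :=
    fun c hc => ⟨hlen c hc, hin c hc⟩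
  have hNn : ((n.toNat : Int)) = n := Int.toNat_of_nonneg (by omega)
  have hg : ∀ c, ∀ e ∈ (buildGraph connections).getD c [], PySem.Raise.InRange n.toNat e.1 :=
    buildGraph_adjOK n.toNat connections (fun c hcm =>
      ⟨(hrows c hcm).1, fun e hem => by
        have h2 := (hrows c hcm).2 e hem
        exact ⟨by omega, by omega⟩⟩)
  have hv0 : PySem.List.pyGet? (List.replicate n.toNat false) (0 : Int) = some false := by
    unfold PySem.List.pyGet? PySem.List.pyIdx?
    have h1 : (0:Int) < n := by omega
    have h2 : 0 < n.toNat := by omega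
    simp [h1, h2]
  have hscan := scan (buildGraph connections) n.toNat hg (n.toNat + 1) [(0, 0)] [] 0
    (List.replicate n.toNat false) (by simp)
    (by
      intro e he
      simp only [List.mem_singleton] at he
      rw [he]
      exact ⟨by omega, by omega⟩)
    (by simp)
  simp only [List.append_nil] at hscan
  rw [show ∀ total vis, loopB (buildGraph connections) [] total vis = total from
    fun total vis => by rw [loopB]] at hscan
  simp only [visitA, hv0] at hscan
  simp only [minReorder, minReorder_alt]
  rw [hscan]
  ring

-- ===== VERDICT (by name: the statement is the Claim_ definition above) =====
theorem minReorder_spec : Claim_equal_minReorder := by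
  intro n connections _hdom hpre
  exact minReorder_eq n connections hpre
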